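-- pv_equiv track=rewrite | github.com/tarponjargon/flask-commerce | flask_app/modules/product/ld_json.py | get_schema_type
-- ===== SOURCE A (Python) =====
-- def get_schema_type(variant_type):
--   """Get the schema.org type for the variant type
--
--   check "variesBy" section of https://developers.google.com/search/docs/appearance/structured-data/product-variants
--   for supported variants.
--
--   There is alot of guesswork here, a huge bucket being
--   "pattern" which is a catch all for anything that doesn't fit the other types
--
--   Args:
--     variant_type (str): The variant type
--
--   Returns:
--     str: The schema.org type for the variant type
--   """
--   if not variant_type:
--     return ""
--
--   vtype = variant_type.lower()
--   if [s for s in ['color','metal','brown','beige'] if s in vtype]: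
--     return "color"
--   if [s for s in ['size','volume','maginification','glassmag','voltage','length','absorbency','elevation','weight','tension','compression'] if s in vtype]:
--     return "size"
--   if "gender" in vtype:
--     return "suggestedGender"
--   if "style" in vtype:
--     return "pattern"
--   if [s for s in ['material','garment','texture'] if s in vtype]:
--     return "material"
--   return "pattern"
-- ===== SOURCE B (Python) =====
-- # Flat keyword -> (priority, schema) map; one min-tracking pass instead of
-- # an ordered chain of group tests.  The keyword with the smallest priority
-- # that occurs in the (lowercased) string decides the schema; no match or
-- # empty input falls back as in the original.
-- KEYWORD_SCHEMA = {
--     'color': (0, 'color'), 'metal': (0, 'color'), 'brown': (0, 'color'), 'beige': (0, 'color'),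
--     'size': (1, 'size'), 'volume': (1, 'size'), 'maginification': (1, 'size'),
--     'glassmag': (1, 'size'), 'voltage': (1, 'size'), 'length': (1, 'size'),
--     'absorbency': (1, 'size'), 'elevation': (1, 'size'), 'weight': (1, 'size'),
--     'tension': (1, 'size'), 'compression': (1, 'size'),
--     'gender': (2, 'suggestedGender'),
--     'style': (3, 'pattern'),
--     'material': (4, 'material'), 'garment': (4, 'material'), 'texture': (4, 'material'),
-- }
--
--
-- def get_schema_type(variant_type):
--     if not variant_type:
--         return ""
--     vtype = variant_type.lower()
--     best = None
--     for keyword, ranked in KEYWORD_SCHEMA.items():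
--         if keyword in vtype and (best is None or ranked[0] < best[0]):
--             best = ranked
--     return best[1] if best is not None else "pattern"
-- ===== Notes on version B (the rewrite author's own statement) =====
-- stated objective: alternative
-- what changed: Replaces A's ordered if-chain of per-group membership tests (first matching group short-circuits) with a flat keyword->(priority,schema) map scanned in one pass that keeps the minimum-priority matching keyword; the group structure and short-circuiting disappear entirely.
import Mathlib
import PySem

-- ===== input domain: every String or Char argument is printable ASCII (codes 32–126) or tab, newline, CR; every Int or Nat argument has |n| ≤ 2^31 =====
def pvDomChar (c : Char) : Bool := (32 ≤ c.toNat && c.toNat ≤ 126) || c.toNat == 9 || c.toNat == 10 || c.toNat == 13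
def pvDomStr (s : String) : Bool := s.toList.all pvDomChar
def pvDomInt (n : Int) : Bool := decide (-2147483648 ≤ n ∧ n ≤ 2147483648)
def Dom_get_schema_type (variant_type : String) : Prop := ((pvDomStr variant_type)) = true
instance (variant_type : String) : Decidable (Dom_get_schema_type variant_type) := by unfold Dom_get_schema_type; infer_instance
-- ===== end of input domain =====

-- B replaces A's ordered if-chain of group tests by a flat keyword->(priority,schema) map
-- scanned in one min-tracking pass (alternative decomposition, same behaviour).

-- ===== PORT A =====
-- literal transliteration of A: empty guard, lower, then an if-chain testing
-- each hard-coded keyword list with a filter comprehension ('truthy' = non-empty).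
def get_schema_type (variant_type : String) : String :=
  if PySem.Str.len variant_type = 0 then ""
  else
    let vtype := PySem.Str.lower variant_type
    if (["color", "metal", "brown", "beige"].filter
        (fun s => PySem.Str.isIn s vtype)) ≠ [] then "color"
    else if (["size", "volume", "maginification", "glassmag", "voltage", "length",
              "absorbency", "elevation", "weight", "tension", "compression"].filter
        (fun s => PySem.Str.isIn s vtype)) ≠ [] then "size"
    else if PySem.Str.isIn "gender" vtype then "suggestedGender"
    else if PySem.Str.isIn "style" vtype then "pattern"
    else if (["material", "garment", "texture"].filter
        (fun s => PySem.Str.isIn s vtype)) ≠ [] then "material"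
    else "pattern"

-- ===== PORT B =====
-- Source B's flat dict KEYWORD_SCHEMA as its items list (insertion order).
def gstTable : List (String × Nat × String) :=
  [ ("color", 0, "color"), ("metal", 0, "color"), ("brown", 0, "color"), ("beige", 0, "color"),
    ("size", 1, "size"), ("volume", 1, "size"), ("maginification", 1, "size"),
    ("glassmag", 1, "size"), ("voltage", 1, "size"), ("length", 1, "size"),
    ("absorbency", 1, "size"), ("elevation", 1, "size"), ("weight", 1, "size"),
    ("tension", 1, "size"), ("compression", 1, "size"),
    ("gender", 2, "suggestedGender"),
    ("style", 3, "pattern"),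
    ("material", 4, "material"), ("garment", 4, "material"), ("texture", 4, "material") ]

-- one loop iteration: keep the best (minimum-priority) matching keyword so far.
def gstStep (vt : String) (best : Option (Nat × String)) (e : String × Nat × String) :
    Option (Nat × String) :=
  match best with
  | none => if PySem.Str.isIn e.1 vt then some e.2 else none
  | some b => if PySem.Str.isIn e.1 vt && decide (e.2.1 < b.1) then some e.2 else some b

def get_schema_type_alt (variant_type : String) : String :=
  if PySem.Str.len variant_type = 0 then ""
  else
    let vtype := PySem.Str.lower variant_type
    match gstTable.foldl (gstStep vtype) none with
    | some b => b.2
    | none => "pattern"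

-- ===== PRECONDITION & SPEC =====
def Spec_get_schema_type (variant_type : String) (out : String) : Prop := out = get_schema_type_alt variant_type
instance (variant_type : String) (out : String) : Decidable (Spec_get_schema_type variant_type out) := by unfold Spec_get_schema_type; infer_instance

-- ===== CLAIM (what is proved, stated in full; the proofs are below) =====
def Claim_equal_get_schema_type : Prop := ∀ (variant_type : String), Dom_get_schema_type variant_type → Spec_get_schema_type variant_type (get_schema_type variant_type)

-- ===== LEMMAS AND PROOFS =====

-- a segment of the table: keywords of one priority group
def gstSeg (p : Nat) (s : String) (ks : List String) : List (String × Nat × String) :=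
  ks.map (fun k => (k, p, s))

theorem gstTable_eq : gstTable =
    gstSeg 0 "color" ["color", "metal", "brown", "beige"] ++
    (gstSeg 1 "size" ["size", "volume", "maginification", "glassmag", "voltage", "length",
        "absorbency", "elevation", "weight", "tension", "compression"] ++
    (gstSeg 2 "suggestedGender" ["gender"] ++
    (gstSeg 3 "pattern" ["style"] ++
     gstSeg 4 "material" ["material", "garment", "texture"]))) := rfl

-- an already-found best of priority ≤ every priority in l survives the rest of the fold
theorem gst_absorb (vt : String) (b : Nat × String) (l : List (String × Nat × String))
    (h : ∀ e ∈ l, ¬ e.2.1 < b.1) : l.foldl (gstStep vt) (some b) = some b := by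
  induction l with
  | nil => rfl
  | cons e t ih =>
    have he : ¬ e.2.1 < b.1 := h e (List.mem_cons_self)
    have : gstStep vt (some b) e = some b := by
      simp [gstStep, he]
    rw [List.foldl_cons, this]
    exact ih (fun e' he' => h e' (List.mem_cons_of_mem _ he'))

theorem gst_absorb_seg (vt : String) (b : Nat × String) (p : Nat) (s : String)
    (ks : List String) (h : ¬ p < b.1) :
    (gstSeg p s ks).foldl (gstStep vt) (some b) = some b := by
  apply gst_absorb
  intro e he
  simp only [gstSeg, List.mem_map] at he
  obtain ⟨k, -, rfl⟩ := he
  exact h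

-- folding one priority group from 'none' finds the group iff some keyword matches
theorem gst_seg_none (vt : String) (p : Nat) (s : String) (ks : List String) :
    (gstSeg p s ks).foldl (gstStep vt) none =
      if ks.any (fun k => PySem.Str.isIn k vt) then some (p, s) else none := by
  induction ks with
  | nil => rfl
  | cons k t ih =>
    by_cases h : PySem.Str.isIn k vt = true
    · have step : gstStep vt none (k, p, s) = some (p, s) := by
        simp only [gstStep, h, if_true]
      simp only [gstSeg, List.map_cons, List.foldl_cons, step, List.any_cons, h, Bool.true_or,
        if_true]
      exact gst_absorb_seg vt (p, s) p s t (lt_irrefl p)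
    · rw [Bool.not_eq_true] at h
      have step : gstStep vt none (k, p, s) = none := by
        simp only [gstStep, h, Bool.false_eq_true, if_false]
      simp only [gstSeg, List.map_cons, List.foldl_cons, step, List.any_cons, h, Bool.false_or]
      exact ih

theorem gst_filter_ne_nil_iff {a : Type} (xs : List a) (p : a → Bool) :
    (xs.filter p ≠ []) = (xs.any p = true) := by
  simp [List.filter_eq_nil_iff, List.any_eq_true]

-- ===== VERDICT (by name: the statement is the Claim_ definition above) =====
theorem get_schema_type_spec : Claim_equal_get_schema_type := by
  intro v _
  unfold Spec_get_schema_type get_schema_type get_schema_type_alt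
  by_cases h0 : PySem.Str.len v = 0
  · simp only [h0, if_true]
  · simp only [h0, if_false]
    set vt := PySem.Str.lower v with hvt
    rw [gstTable_eq]
    simp only [List.foldl_append, gst_filter_ne_nil_iff, gst_seg_none]
    by_cases h1 : (["color", "metal", "brown", "beige"].any fun s => PySem.Str.isIn s vt) = true
    · simp only [h1, if_true]
      rw [gst_absorb_seg vt (0, "color") 1 "size" _ (by decide),
          gst_absorb_seg vt (0, "color") 2 "suggestedGender" _ (by decide),
          gst_absorb_seg vt (0, "color") 3 "pattern" _ (by decide),
          gst_absorb_seg vt (0, "color") 4 "material" _ (by decide)]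
    · rw [Bool.not_eq_true] at h1
      simp only [h1, Bool.false_eq_true, if_false, gst_seg_none]
      by_cases h2 : (["size", "volume", "maginification", "glassmag", "voltage", "length",
          "absorbency", "elevation", "weight", "tension", "compression"].any
            fun s => PySem.Str.isIn s vt) = true
      · simp only [h2, if_true]
        rw [gst_absorb_seg vt (1, "size") 2 "suggestedGender" _ (by decide),
            gst_absorb_seg vt (1, "size") 3 "pattern" _ (by decide),
            gst_absorb_seg vt (1, "size") 4 "material" _ (by decide)]
      · rw [Bool.not_eq_true] at h2
        simp only [h2, Bool.false_eq_true, if_false, gst_seg_none]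
        by_cases h3 : PySem.Str.isIn "gender" vt = true
        · have h3' : (["gender"].any fun k => PySem.Str.isIn k vt) = true := by
            simp only [List.any_cons, List.any_nil, h3, Bool.true_or]
          simp only [h3, h3', if_true]
          rw [gst_absorb_seg vt (2, "suggestedGender") 3 "pattern" _ (by decide),
              gst_absorb_seg vt (2, "suggestedGender") 4 "material" _ (by decide)]
        · have h3' : (["gender"].any fun k => PySem.Str.isIn k vt) = false := by
            rw [Bool.not_eq_true] at h3
            simp only [List.any_cons, List.any_nil, h3, Bool.false_or]
          simp only [h3, h3', Bool.false_eq_true, if_false, gst_seg_none]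
          by_cases h4 : PySem.Str.isIn "style" vt = true
          · have h4' : (["style"].any fun k => PySem.Str.isIn k vt) = true := by
              simp only [List.any_cons, List.any_nil, h4, Bool.true_or]
            simp only [h4, h4', if_true]
            rw [gst_absorb_seg vt (3, "pattern") 4 "material" _ (by decide)]
          · have h4' : (["style"].any fun k => PySem.Str.isIn k vt) = false := by
              rw [Bool.not_eq_true] at h4
              simp only [List.any_cons, List.any_nil, h4, Bool.false_or]
            simp only [h4, h4', Bool.false_eq_true, if_false, gst_seg_none]
            by_cases h5 : (["material", "garment", "texture"].any
                fun s => PySem.Str.isIn s vt) = true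
            · simp only [h5, if_true]
            · rw [Bool.not_eq_true] at h5
              simp only [h5, Bool.false_eq_true, if_false]
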